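-- pv_equiv track=rewrite | github.com/zdx3578/ARC-AGI-3-Agents | agents/templates/active_inference/efe.py | _signature_key_with_delta
-- ===== SOURCE A (Python) =====
-- def _signature_key_with_delta(signature_key: str) -> str:
--     sig_type = "OBSERVED_UNCLASSIFIED"
--     progress = "0"
--     delta = "na"
--     for part in str(signature_key).split("|"):
--         if part.startswith("type="):
--             sig_type = part.split("=", 1)[1]
--         elif part.startswith("progress="):
--             progress = part.split("=", 1)[1]
--         elif part.startswith("delta="):
--             delta = part.split("=", 1)[1]
--     return f"type={sig_type}|progress={progress}|delta={delta}"
-- ===== SOURCE B (Python) =====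
-- def _signature_key_with_delta(signature_key: str) -> str:
--     parts = str(signature_key).split("|")
--
--     def last_value(prefix: str, default: str) -> str:
--         for part in reversed(parts):
--             if part.startswith(prefix):
--                 return part[len(prefix):]
--         return default
--
--     sig_type = last_value("type=", "OBSERVED_UNCLASSIFIED")
--     progress = last_value("progress=", "0")
--     delta = last_value("delta=", "na")
--     return f"type={sig_type}|progress={progress}|delta={delta}"
-- ===== Notes on version B (the rewrite author's own statement) =====
-- stated objective: alternative
-- what changed: Instead of one forward pass threading three scalar accumulators through an if/elif chain that re-splits each matching part, B searches the split parts back-to-front once per field (first match from the end = last-wins) and slices the known prefix off instead of splitting the part again.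
import Mathlib
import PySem

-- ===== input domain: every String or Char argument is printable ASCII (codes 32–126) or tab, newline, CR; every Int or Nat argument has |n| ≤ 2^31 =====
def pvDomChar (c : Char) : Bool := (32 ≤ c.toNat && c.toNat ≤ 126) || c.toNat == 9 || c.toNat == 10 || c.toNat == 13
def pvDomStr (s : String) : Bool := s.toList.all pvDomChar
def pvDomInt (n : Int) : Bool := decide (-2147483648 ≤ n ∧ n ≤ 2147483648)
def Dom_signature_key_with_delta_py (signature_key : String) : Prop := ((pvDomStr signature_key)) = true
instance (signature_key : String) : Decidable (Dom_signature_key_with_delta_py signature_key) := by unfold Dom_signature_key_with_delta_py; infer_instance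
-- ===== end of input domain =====

-- B replaces A's single forward fold over three tracked scalars by one back-to-front search per
-- field, slicing the prefix off the first (i.e. last) matching part; alternative, same cost.

-- ===== PORT A =====
-- part.split("=", 1)[1]; the [1] indexing cannot raise at A's call sites (the part is known to
-- contain '=' there), so pyGetD with a dummy default is exact at those call sites.
def pvSplitEq1 (part : List Char) : List Char :=
  PySem.List.pyGetD ((PySem.Chars.splitMax? part "=".toList 1).getD []) 1 []

def signature_key_with_delta_py (signature_key : String) : String :=
  let st := (PySem.Chars.splitOn signature_key.toList "|".toList).foldl
    (fun (acc : List Char × List Char × List Char) part =>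
      if PySem.Chars.startswith part "type=".toList then (pvSplitEq1 part, acc.2.1, acc.2.2)
      else if PySem.Chars.startswith part "progress=".toList then (acc.1, pvSplitEq1 part, acc.2.2)
      else if PySem.Chars.startswith part "delta=".toList then (acc.1, acc.2.1, pvSplitEq1 part)
      else acc)
    ("OBSERVED_UNCLASSIFIED".toList, "0".toList, "na".toList)
  String.ofList ("type=".toList ++ st.1 ++ "|progress=".toList ++ st.2.1 ++ "|delta=".toList ++ st.2.2)

-- ===== PORT B =====
-- 'for part in reversed(parts): if part.startswith(prefix): return part[len(prefix):] / return default'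
def pvLastValue (parts : List (List Char)) (pre dflt : List Char) : List Char :=
  match parts.reverse.find? (fun part => PySem.Chars.startswith part pre) with
  | some part => PySem.Chars.slice part (some (pre.length : Int)) none
  | none => dflt

def signature_key_with_delta_py_alt (signature_key : String) : String :=
  let parts := PySem.Chars.splitOn signature_key.toList "|".toList
  let sig_type := pvLastValue parts "type=".toList "OBSERVED_UNCLASSIFIED".toList
  let progress := pvLastValue parts "progress=".toList "0".toList
  let delta := pvLastValue parts "delta=".toList "na".toList
  String.ofList ("type=".toList ++ sig_type ++ "|progress=".toList ++ progress ++ "|delta=".toList ++ delta)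

-- ===== PRECONDITION & SPEC =====
def Spec_signature_key_with_delta_py (signature_key : String) (out : String) : Prop := out = signature_key_with_delta_py_alt signature_key
instance (signature_key : String) (out : String) : Decidable (Spec_signature_key_with_delta_py signature_key out) := by unfold Spec_signature_key_with_delta_py; infer_instance

-- ===== CLAIM (what is proved, stated in full; the proofs are below) =====
def Claim_equal_signature_key_with_delta_py : Prop := ∀ (signature_key : String), Dom_signature_key_with_delta_py signature_key → Spec_signature_key_with_delta_py signature_key (signature_key_with_delta_py signature_key)

-- ===== LEMMAS AND PROOFS =====

-- splitOnMax.go with no splits left returns the remainder wholesale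
theorem pv_go_zero (sep : List Char) (fuel : Nat) (l cur : List Char) (acc : List (List Char)) :
    PySem.Chars.splitOnMax.go sep fuel 0 l cur acc = ((cur.reverse ++ l) :: acc).reverse := by
  cases fuel with
  | zero => simp [PySem.Chars.splitOnMax.go]
  | succ f => cases l <;> simp [PySem.Chars.splitOnMax.go]

-- splitOnMax.go with one split left on key ++ '=' :: rest, '=' not in key
theorem pv_go_one (p : List Char) (rest cur : List Char) (acc : List (List Char)) (fuel : Nat)
    (hp : '=' ∉ p) (hf : p.length < fuel) :
    PySem.Chars.splitOnMax.go "=".toList fuel 1 (p ++ '=' :: rest) cur acc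
      = acc.reverse ++ [cur.reverse ++ p, rest] := by
  induction p generalizing cur fuel with
  | nil =>
    cases fuel with
    | zero => omega
    | succ f =>
      simp only [List.nil_append, PySem.Chars.splitOnMax.go]
      simp [List.isPrefixOf, pv_go_zero]
  | cons c p ih =>
    cases fuel with
    | zero => omega
    | succ f =>
      have hc : c ≠ '=' := fun h => hp (h ▸ List.mem_cons_self ..)
      simp only [List.cons_append, PySem.Chars.splitOnMax.go]
      rw [if_neg (by omega), if_neg (by simp [List.isPrefixOf, hc.symm])]
      rw [ih (c :: cur) f (fun h => hp (List.mem_cons_of_mem _ h)) (by simpa using hf)]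
      simp

theorem pv_splitMax_one (p rest : List Char) (hp : '=' ∉ p) :
    PySem.Chars.splitMax? (p ++ '=' :: rest) "=".toList 1 = some [p, rest] := by
  simp only [PySem.Chars.splitMax?, PySem.Chars.splitOnMax]
  rw [if_neg (by decide), if_neg (by omega)]
  have ht : (1 : Int).toNat = 1 := rfl
  rw [ht, pv_go_one p rest [] [] _ hp (by simp)]
  simp

theorem pv_splitEq1_eq (p rest : List Char) (hp : '=' ∉ p) :
    pvSplitEq1 (p ++ '=' :: rest) = rest := by
  unfold pvSplitEq1
  rw [pv_splitMax_one p rest hp]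
  simp [PySem.List.pyGetD, PySem.List.pyGet?, PySem.List.pyIdx?]

-- the first character of any prefix a string starts with is the string's head
theorem pv_startswith_head (s : List Char) (c : Char) (p : List Char)
    (h : PySem.Chars.startswith s (c :: p) = true) : s.head? = some c := by
  cases s with
  | nil => simp [PySem.Chars.startswith, List.isPrefixOf] at h
  | cons a s =>
    simp only [PySem.Chars.startswith, List.isPrefixOf, Bool.and_eq_true, beq_iff_eq] at h
    simp [h.1]

-- a string cannot start with two prefixes whose first characters differ
theorem pv_startswith_ne (s : List Char) (c1 c2 : Char) (p1 p2 : List Char) (h : c1 ≠ c2)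
    (h1 : PySem.Chars.startswith s (c1 :: p1) = true) :
    PySem.Chars.startswith s (c2 :: p2) = false := by
  cases hb : PySem.Chars.startswith s (c2 :: p2)
  · rfl
  · exfalso
    have e1 := pv_startswith_head s c1 p1 h1
    have e2 := pv_startswith_head s c2 p2 hb
    exact h (Option.some.inj (e1.symm.trans e2))

-- A's fold result, field by field, is a search-from-the-right (with pvSplitEq1 as extractor)
def pvLastA (parts : List (List Char)) (pre dflt : List Char) : List Char :=
  match parts.reverse.find? (fun part => PySem.Chars.startswith part pre) with
  | some part => pvSplitEq1 part
  | none => dflt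

theorem pv_lastA_cons (h : List Char) (tl : List (List Char)) (pre dflt : List Char) :
    pvLastA (h :: tl) pre dflt
      = pvLastA tl pre (if PySem.Chars.startswith h pre then pvSplitEq1 h else dflt) := by
  simp only [pvLastA, List.reverse_cons, List.find?_append]
  cases hf : tl.reverse.find? (fun part => PySem.Chars.startswith part pre) with
  | some part => simp
  | none =>
    by_cases hsw : PySem.Chars.startswith h pre = true
    · simp [List.find?, hsw]
    · simp [List.find?, hsw]

theorem pv_fold_eq (parts : List (List Char)) (t p d : List Char) :
    parts.foldl
      (fun (acc : List Char × List Char × List Char) part =>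
        if PySem.Chars.startswith part "type=".toList then (pvSplitEq1 part, acc.2.1, acc.2.2)
        else if PySem.Chars.startswith part "progress=".toList then (acc.1, pvSplitEq1 part, acc.2.2)
        else if PySem.Chars.startswith part "delta=".toList then (acc.1, acc.2.1, pvSplitEq1 part)
        else acc)
      (t, p, d)
      = (pvLastA parts "type=".toList t, pvLastA parts "progress=".toList p,
         pvLastA parts "delta=".toList d) := by
  induction parts generalizing t p d with
  | nil => simp [pvLastA]
  | cons h tl ih =>
    simp only [List.foldl_cons]
    rw [pv_lastA_cons, pv_lastA_cons, pv_lastA_cons]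
    by_cases h1 : PySem.Chars.startswith h "type=".toList = true
    · have n2 : PySem.Chars.startswith h "progress=".toList = false :=
        pv_startswith_ne h 't' 'p' "ype=".toList "rogress=".toList (by decide) h1
      have n3 : PySem.Chars.startswith h "delta=".toList = false :=
        pv_startswith_ne h 't' 'd' "ype=".toList "elta=".toList (by decide) h1
      simp only [h1, n2, n3, Bool.false_eq_true, if_true, if_false]
      exact ih _ _ _
    · by_cases h2 : PySem.Chars.startswith h "progress=".toList = true
      · have n3 : PySem.Chars.startswith h "delta=".toList = false :=
          pv_startswith_ne h 'p' 'd' "rogress=".toList "elta=".toList (by decide) h2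
        simp only [h1, h2, n3, Bool.false_eq_true, if_true, if_false]
        exact ih _ _ _
      · by_cases h3 : PySem.Chars.startswith h "delta=".toList = true
        · simp only [h1, h2, h3, if_true]
          exact ih _ _ _
        · simp only [h1, h2, h3]
          exact ih _ _ _

-- on a key-'='-prefix, pvSplitEq1 of a matching part is the prefix-stripped slice
theorem pv_lastA_eq_lastValue (parts : List (List Char)) (key : List Char) (dflt : List Char)
    (hk : '=' ∉ key) :
    pvLastA parts (key ++ ['=']) dflt = pvLastValue parts (key ++ ['=']) dflt := by
  simp only [pvLastA, pvLastValue]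
  cases hfind : parts.reverse.find? (fun part => PySem.Chars.startswith part (key ++ ['='])) with
  | none => rfl
  | some part =>
    have hsw := List.find?_some hfind
    have hpre : (key ++ ['=']) <+: part := by
      simpa [PySem.Chars.startswith, List.isPrefixOf_iff_prefix] using hsw
    obtain ⟨rest, hrest⟩ := hpre
    have hpart : part = key ++ '=' :: rest := by simpa using hrest.symm
    subst hpart
    show pvSplitEq1 (key ++ '=' :: rest)
      = PySem.Chars.slice (key ++ '=' :: rest) (some ((key ++ ['=']).length : Int)) none
    rw [pv_splitEq1_eq key rest hk]
    rw [PySem.Chars.slice_eq_listSlice, PySem.List.slice_from_natCast]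
    simp [List.drop_append]

-- ===== VERDICT (by name: the statement is the Claim_ definition above) =====
theorem signature_key_with_delta_py_spec : Claim_equal_signature_key_with_delta_py := by
  intro sk _
  unfold Spec_signature_key_with_delta_py signature_key_with_delta_py signature_key_with_delta_py_alt
  simp only [pv_fold_eq]
  have h1 := pv_lastA_eq_lastValue (PySem.Chars.splitOn sk.toList "|".toList) "type".toList "OBSERVED_UNCLASSIFIED".toList (by decide)
  have h2 := pv_lastA_eq_lastValue (PySem.Chars.splitOn sk.toList "|".toList) "progress".toList "0".toList (by decide)
  have h3 := pv_lastA_eq_lastValue (PySem.Chars.splitOn sk.toList "|".toList) "delta".toList "na".toList (by decide)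
  simp only [show "type".toList ++ ['='] = "type=".toList from rfl,
             show "progress".toList ++ ['='] = "progress=".toList from rfl,
             show "delta".toList ++ ['='] = "delta=".toList from rfl] at h1 h2 h3
  rw [h1, h2, h3]
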